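-- pv_equiv track=rewrite | github.com/Mouret-Orfeu/Projet-Code-circulaire | src/main.py | check_if_all_elements_are_in_list_of_list
-- ===== SOURCE A (Python) =====
-- def check_if_all_elements_are_in_list_of_list(list_of_list, set_tetra):
--     for tetra in set_tetra:
--         is_in_list = False
--         for list in list_of_list:
--             if tetra in list:
--                 is_in_list = True
--         if not is_in_list:
--             return False
--     return True
-- ===== SOURCE B (Python) =====
-- def check_if_all_elements_are_in_list_of_list(list_of_list, set_tetra):
--     remaining = set(set_tetra)
--     for sub in list_of_list:
--         if not remaining:
--             break
--         remaining.difference_update(sub)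
--     return not remaining
-- ===== Notes on version B (the rewrite author's own statement) =====
-- stated objective: alternative
-- what changed: Inverted the loop nesting: instead of scanning all sublists for each element, B keeps a shrinking set of not-yet-found elements, removes each sublist's elements from it in one outer pass (breaking early once empty), and returns whether the set is empty.
import Mathlib
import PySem

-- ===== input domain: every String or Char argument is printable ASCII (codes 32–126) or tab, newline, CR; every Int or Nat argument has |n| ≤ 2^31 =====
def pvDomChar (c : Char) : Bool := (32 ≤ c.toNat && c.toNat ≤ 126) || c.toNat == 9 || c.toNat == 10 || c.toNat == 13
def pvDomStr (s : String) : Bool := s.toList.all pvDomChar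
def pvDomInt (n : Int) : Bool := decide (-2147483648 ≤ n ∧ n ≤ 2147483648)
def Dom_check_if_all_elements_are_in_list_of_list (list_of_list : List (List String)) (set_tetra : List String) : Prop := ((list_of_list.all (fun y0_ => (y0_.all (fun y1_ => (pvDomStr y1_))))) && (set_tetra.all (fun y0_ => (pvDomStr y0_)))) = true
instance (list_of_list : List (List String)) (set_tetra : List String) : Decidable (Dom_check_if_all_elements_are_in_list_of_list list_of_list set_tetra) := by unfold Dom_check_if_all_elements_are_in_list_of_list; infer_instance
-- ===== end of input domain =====

-- B inverts the loop nesting: one sublist-outer pass over a shrinking set of not-yet-found elements (alternative decomposition, same observable result).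

-- ===== PORT A =====
-- inner loop of A: 'for list in list_of_list: if tetra in list: is_in_list = True'
def aFound (list_of_list : List (List String)) (tetra : String) : Bool :=
  list_of_list.foldl (fun is_in_list l => if l.contains tetra then true else is_in_list) false

-- A: for each tetra, scan every sublist; return False as soon as one tetra is in none
def check_if_all_elements_are_in_list_of_list (list_of_list : List (List String)) (set_tetra : List String) : Bool :=
  match set_tetra with
  | [] => true
  | tetra :: rest =>
    if !(aFound list_of_list tetra) then false
    else check_if_all_elements_are_in_list_of_list list_of_list rest

-- ===== PORT B =====
-- B's outer loop: remove each sublist's elements from the remaining set, break early when empty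
def altLoop (list_of_list : List (List String)) (remaining : PySem.Set String) : PySem.Set String :=
  match list_of_list with
  | [] => remaining
  | sub :: rest =>
    if remaining.isEmpty then remaining
    else altLoop rest (PySem.Set.diff remaining sub)

-- B (alternative decomposition: sublist-outer pass over a shrinking set of unfound elements)
def check_if_all_elements_are_in_list_of_list_alt (list_of_list : List (List String)) (set_tetra : List String) : Bool :=
  (altLoop list_of_list (PySem.Set.ofList set_tetra)).isEmpty

-- ===== PRECONDITION & SPEC =====
def Spec_check_if_all_elements_are_in_list_of_list (list_of_list : List (List String)) (set_tetra : List String) (out : Bool) : Prop := out = check_if_all_elements_are_in_list_of_list_alt list_of_list set_tetra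
instance (list_of_list : List (List String)) (set_tetra : List String) (out : Bool) : Decidable (Spec_check_if_all_elements_are_in_list_of_list list_of_list set_tetra out) := by unfold Spec_check_if_all_elements_are_in_list_of_list; infer_instance

-- ===== CLAIM (what is proved, stated in full; the proofs are below) =====
def Claim_equal_check_if_all_elements_are_in_list_of_list : Prop := ∀ (list_of_list : List (List String)) (set_tetra : List String), Dom_check_if_all_elements_are_in_list_of_list list_of_list set_tetra → Spec_check_if_all_elements_are_in_list_of_list list_of_list set_tetra (check_if_all_elements_are_in_list_of_list list_of_list set_tetra)

-- ===== LEMMAS AND PROOFS =====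

lemma aFound_eq (tetra : String) (lol : List (List String)) (b : Bool) :
    lol.foldl (fun is_in_list l => if l.contains tetra then true else is_in_list) b
      = (b || lol.any (fun l => l.contains tetra)) := by
  induction lol generalizing b with
  | nil => simp
  | cons l rest ih =>
    simp only [List.foldl_cons, List.any_cons, ih]
    cases b <;> simp

lemma a_eq_all (lol : List (List String)) (st : List String) :
    check_if_all_elements_are_in_list_of_list lol st
      = st.all (fun t => lol.any (fun l => l.contains t)) := by
  induction st with
  | nil => rfl
  | cons t rest ih =>
    simp only [check_if_all_elements_are_in_list_of_list, aFound, aFound_eq, Bool.false_or, ih,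
      List.all_cons]
    cases hA : lol.any (fun l => l.contains t) <;> simp_all [List.any_eq_true]

lemma altLoop_isEmpty (lol : List (List String)) (r : List String) :
    (altLoop lol r).isEmpty = r.all (fun t => lol.any (fun l => l.contains t)) := by
  induction lol generalizing r with
  | nil => cases r <;> simp [altLoop]
  | cons sub rest ih =>
    simp only [altLoop]
    by_cases hr : r.isEmpty
    · have : r = [] := List.isEmpty_iff.mp hr
      simp [this]
    · rw [if_neg hr, ih]
      show (r.filter (fun t => !sub.contains t)).all _ = _  -- Set.diff r sub is by definition this filter
      induction r with
      | nil => simp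
      | cons t tr ihr =>
        by_cases h : sub.contains t <;>
          simp [List.filter_cons] <;>
          by_cases h2 : tr.all (fun t => !sub.contains t || (sub.contains t || rest.any fun l => l.contains t)) <;>
          simp_all

lemma alt_eq_all (lol : List (List String)) (st : List String) :
    check_if_all_elements_are_in_list_of_list_alt lol st
      = st.all (fun t => lol.any (fun l => l.contains t)) := by
  unfold check_if_all_elements_are_in_list_of_list_alt
  rw [altLoop_isEmpty]
  have h : (List.all (PySem.Set.ofList st) (fun t => lol.any (fun l => l.contains t)) = true)
      ↔ (st.all (fun t => lol.any (fun l => l.contains t)) = true) := by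
    simp [List.all_eq_true, PySem.Set.mem_ofList]
  exact Bool.eq_iff_iff.mpr h

-- ===== VERDICT (by name: the statement is the Claim_ definition above) =====
theorem check_if_all_elements_are_in_list_of_list_spec : Claim_equal_check_if_all_elements_are_in_list_of_list := by
  intro lol st _
  unfold Spec_check_if_all_elements_are_in_list_of_list
  rw [a_eq_all, alt_eq_all]
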